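-- pv_equiv track=rewrite | github.com/TanyashaVoron/PuthonCoolTasksFromUni | 4.py | __sortid_list__
-- ===== SOURCE A (Python) =====
-- def __sortid_list__(List, reverse, k=''):
--     sortedList = {}
--
--     sortedkeys = sorted(List, key=List.get, reverse=reverse)
--     for w in sortedkeys:
--         sortedList[w] = List[w]
--
--     s = list(sortedList.keys())[0]
--     sortedkeys.clear()
--
--     for key in sortedList:
--         if sortedList[key] == sortedList[s]:
--             sortedkeys.append(key)
--
--     if k == '*3':
--         sortedkeys.sort()
--     return sortedkeys
-- ===== SOURCE B (Python) =====
-- def __sortid_list__(List, reverse, k=''):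
--     best = None
--     result = []
--     for key, value in List.items():
--         if best is None or (value > best if reverse else value < best):
--             best = value
--             result = [key]
--         elif value == best:
--             result.append(key)
--     if k == '*3':
--         result.sort()
--     return result
-- ===== Notes on version B (the rewrite author's own statement) =====
-- stated objective: faster
-- what changed: Replaced sort-by-value + dict rebuild + equality scan with a single linear pass that tracks the current extreme value and the bucket of keys attaining it.
import Mathlib
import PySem

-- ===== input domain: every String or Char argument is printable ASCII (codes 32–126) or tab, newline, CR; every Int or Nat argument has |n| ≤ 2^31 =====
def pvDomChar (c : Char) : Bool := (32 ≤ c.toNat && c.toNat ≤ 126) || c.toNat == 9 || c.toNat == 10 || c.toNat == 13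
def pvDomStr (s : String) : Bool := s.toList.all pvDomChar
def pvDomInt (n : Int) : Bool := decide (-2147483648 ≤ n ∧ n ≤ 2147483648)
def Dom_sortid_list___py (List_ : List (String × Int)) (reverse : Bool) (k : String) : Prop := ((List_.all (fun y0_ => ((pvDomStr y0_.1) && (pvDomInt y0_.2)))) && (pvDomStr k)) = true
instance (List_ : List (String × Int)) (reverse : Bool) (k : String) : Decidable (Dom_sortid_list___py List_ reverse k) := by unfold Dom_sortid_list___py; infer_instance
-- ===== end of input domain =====

-- B replaces A's sort-by-value + dict rebuild + equality scan by one linear pass keeping the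
-- running extreme value and the keys attaining it (objective: faster). Return values only; A mutates nothing.

-- ===== PORT A =====
-- A's locals, as helper definitions: the input dict, the value-sorted key list, the rebuilt dict
def aDict (List_ : List (String × Int)) : PySem.Dict String Int := PySem.Dict.mk List_   -- the parameter 'List' is a dict

def aSortedkeys (List_ : List (String × Int)) (reverse : Bool) : List String :=
  PySem.List.sorted (aDict List_).keys (fun w => (aDict List_).getD w 0) reverse   -- key=List.get (keys are present, so .get is .getD)

def aSortedList (List_ : List (String × Int)) (reverse : Bool) : PySem.Dict String Int :=
  (aSortedkeys List_ reverse).foldl (fun sl w => sl.insert w ((aDict List_).getD w 0)) PySem.Dict.empty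

-- everything of A before the final 'if k == "*3"': s = first key of sortedList, then collect the
-- keys whose value equals the value of s
def aCollect (List_ : List (String × Int)) (reverse : Bool) : List String :=
  match PySem.List.pyGet? (aSortedList List_ reverse).keys 0 with   -- s = list(sortedList.keys())[0]; none = IndexError (outside Pre_)
  | none => []
  | some s =>
      (aSortedList List_ reverse).keys.foldl
        (fun acc key =>
          if (aSortedList List_ reverse).getD key 0 == (aSortedList List_ reverse).getD s 0
          then acc ++ [key] else acc) []

def sortid_list___py (List_ : List (String × Int)) (reverse : Bool) (k : String) : List String :=
  let sortedkeys := aCollect List_ reverse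
  if k == "*3" then PySem.List.sorted sortedkeys (fun x => x) false else sortedkeys

-- ===== PORT B =====
-- one step of B's loop body: state = (best, result)
def bStep (reverse : Bool) (acc : Option Int × List String) (kv : String × Int) : Option Int × List String :=
  match acc with
  | (none, _) => (some kv.2, [kv.1])
  | (some best, res) =>
      if (if reverse then best < kv.2 else kv.2 < best) then (some kv.2, [kv.1])
      else if kv.2 == best then (some best, res ++ [kv.1])
      else (some best, res)

def sortid_list___py_alt (List_ : List (String × Int)) (reverse : Bool) (k : String) : List String :=
  let result := (List_.foldl (bStep reverse) (none, [])).2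
  if k == "*3" then PySem.List.sorted result (fun x => x) false else result

-- ===== PRECONDITION & SPEC =====
-- Pre_ excludes the empty dict (A raises IndexError on it) and association lists with duplicate
-- keys, which a Python dict cannot represent (dict construction collapses them before A runs).
def Pre_sortid_list___py (List_ : List (String × Int)) (reverse : Bool) (k : String) : Prop :=
  List_ ≠ [] ∧ (List_.map Prod.fst).Nodup
instance (List_ : List (String × Int)) (reverse : Bool) (k : String) : Decidable (Pre_sortid_list___py List_ reverse k) := by unfold Pre_sortid_list___py; infer_instance
def pvWitness_sortid_list___py : (List (String × Int)) × Bool × String := ([("a", 1), ("b", 2)], false, "")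

def Spec_sortid_list___py (List_ : List (String × Int)) (reverse : Bool) (k : String) (out : List String) : Prop := out = sortid_list___py_alt List_ reverse k
instance (List_ : List (String × Int)) (reverse : Bool) (k : String) (out : List String) : Decidable (Spec_sortid_list___py List_ reverse k out) := by unfold Spec_sortid_list___py; infer_instance

-- ===== CLAIM (what is proved, stated in full; the proofs are below) =====
def Claim_equal_sortid_list___py : Prop := ∀ (List_ : List (String × Int)) (reverse : Bool) (k : String), Dom_sortid_list___py List_ reverse k → Pre_sortid_list___py List_ reverse k → Spec_sortid_list___py List_ reverse k (sortid_list___py List_ reverse k)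

-- ===== LEMMAS AND PROOFS =====

-- value lookup in the input dict
def dval (List_ : List (String × Int)) (w : String) : Int := (PySem.Dict.mk List_).getD w 0

lemma dval_eq (List_ : List (String × Int)) (hnd : (List_.map Prod.fst).Nodup)
    {kv : String × Int} (hkv : kv ∈ List_) : dval List_ kv.1 = kv.2 := by
  exact PySem.Dict.getD_of_mem_items (PySem.Dict.mk List_) hkv hnd 0

-- ---- stability of the stable sort on the extreme bucket ----

lemma filter_insertBy_min {α : Type} (key : α → Int) (m : Int) (x : α) :
    ∀ ys : List α, (∀ y ∈ ys, m ≤ key y) → ys.Pairwise (fun a b => key a ≤ key b) → m ≤ key x →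
    (PySem.List.insertBy (fun a b => decide (key a < key b)) x ys).filter (fun z => key z == m)
      = ys.filter (fun z => key z == m) ++ if key x == m then [x] else [] := by
  intro ys
  induction ys with
  | nil =>
    intro _ _ _
    by_cases h : key x = m <;> simp [PySem.List.insertBy, h]
  | cons y t ih =>
    intro hge hpw hx
    by_cases hlt : key x < key y
    · have h1 : PySem.List.insertBy (fun a b => decide (key a < key b)) x (y :: t)
          = x :: y :: t := by simp [PySem.List.insertBy, hlt]
      rw [h1]
      by_cases hxm : key x = m
      · have hym : m < key y := by omega
        have ht : ∀ z ∈ y :: t, ¬ ((key z == m) = true) := by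
          intro z hz
          rcases List.mem_cons.mp hz with h | h
          · subst h; simp; omega
          · have := (List.pairwise_cons.mp hpw).1 z h
            simp; omega
        have h0 : (y :: t).filter (fun z => key z == m) = [] := List.filter_eq_nil_iff.mpr ht
        rw [List.filter_cons_of_pos (by simp [hxm]), h0]
        simp [hxm]
      · rw [List.filter_cons_of_neg (by simp [hxm])]
        simp [hxm]
    · have h1 : PySem.List.insertBy (fun a b => decide (key a < key b)) x (y :: t)
          = y :: PySem.List.insertBy (fun a b => decide (key a < key b)) x t := by
        simp [PySem.List.insertBy, hlt]
      rw [h1]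
      have ih' := ih (fun z hz => hge z (List.mem_cons_of_mem _ hz)) (List.pairwise_cons.mp hpw).2 hx
      by_cases hym : key y = m
      · rw [List.filter_cons_of_pos (by simp [hym]), List.filter_cons_of_pos (by simp [hym]), ih']
        simp
      · rw [List.filter_cons_of_neg (by simp [hym]), List.filter_cons_of_neg (by simp [hym]), ih']

lemma filter_insertBy_max {α : Type} (key : α → Int) (m : Int) (x : α) :
    ∀ ys : List α, (∀ y ∈ ys, key y ≤ m) → ys.Pairwise (fun a b => key b ≤ key a) → key x ≤ m →
    (PySem.List.insertBy (fun a b => decide (key b < key a)) x ys).filter (fun z => key z == m)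
      = ys.filter (fun z => key z == m) ++ if key x == m then [x] else [] := by
  intro ys
  induction ys with
  | nil =>
    intro _ _ _
    by_cases h : key x = m <;> simp [PySem.List.insertBy, h]
  | cons y t ih =>
    intro hge hpw hx
    by_cases hlt : key y < key x
    · have h1 : PySem.List.insertBy (fun a b => decide (key b < key a)) x (y :: t)
          = x :: y :: t := by simp [PySem.List.insertBy, hlt]
      rw [h1]
      by_cases hxm : key x = m
      · have hym : key y < m := by omega
        have ht : ∀ z ∈ y :: t, ¬ ((key z == m) = true) := by
          intro z hz
          rcases List.mem_cons.mp hz with h | h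
          · subst h; simp; omega
          · have := (List.pairwise_cons.mp hpw).1 z h
            simp; omega
        have h0 : (y :: t).filter (fun z => key z == m) = [] := List.filter_eq_nil_iff.mpr ht
        rw [List.filter_cons_of_pos (by simp [hxm]), h0]
        simp [hxm]
      · rw [List.filter_cons_of_neg (by simp [hxm])]
        simp [hxm]
    · have h1 : PySem.List.insertBy (fun a b => decide (key b < key a)) x (y :: t)
          = y :: PySem.List.insertBy (fun a b => decide (key b < key a)) x t := by
        simp [PySem.List.insertBy, hlt]
      rw [h1]
      have ih' := ih (fun z hz => hge z (List.mem_cons_of_mem _ hz)) (List.pairwise_cons.mp hpw).2 hx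
      by_cases hym : key y = m
      · rw [List.filter_cons_of_pos (by simp [hym]), List.filter_cons_of_pos (by simp [hym]), ih']
        simp
      · rw [List.filter_cons_of_neg (by simp [hym]), List.filter_cons_of_neg (by simp [hym]), ih']

lemma filter_sorted_min {α : Type} (key : α → Int) (m : Int) (xs : List α)
    (h : ∀ y ∈ xs, m ≤ key y) :
    (PySem.List.sorted xs key).filter (fun z => key z == m) = xs.filter (fun z => key z == m) := by
  induction xs using List.reverseRecOn with
  | nil => simp [PySem.List.sorted_eq_foldl_insertBy]
  | append_singleton xs x ih =>
    have hsnoc : PySem.List.sorted (xs ++ [x]) key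
        = PySem.List.insertBy (fun a b => decide (key a < key b)) x (PySem.List.sorted xs key) := by
      rw [PySem.List.sorted_eq_foldl_insertBy, PySem.List.sorted_eq_foldl_insertBy, List.foldl_append]
      simp
    rw [hsnoc,
      filter_insertBy_min key m x (PySem.List.sorted xs key)
        (fun y hy => h y (List.mem_append_left _ ((PySem.List.mem_sorted xs key false y).mp hy)))
        (PySem.List.sorted_pairwise xs key)
        (h x (by simp)),
      ih (fun y hy => h y (List.mem_append_left _ hy)), List.filter_append]
    by_cases hxm : key x = m <;> simp [hxm]

lemma filter_sorted_max {α : Type} (key : α → Int) (m : Int) (xs : List α)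
    (h : ∀ y ∈ xs, key y ≤ m) :
    (PySem.List.sorted xs key true).filter (fun z => key z == m) = xs.filter (fun z => key z == m) := by
  induction xs using List.reverseRecOn with
  | nil => simp [PySem.List.sorted_rev_eq_foldl_insertBy]
  | append_singleton xs x ih =>
    have hsnoc : PySem.List.sorted (xs ++ [x]) key true
        = PySem.List.insertBy (fun a b => decide (key b < key a)) x (PySem.List.sorted xs key true) := by
      rw [PySem.List.sorted_rev_eq_foldl_insertBy, PySem.List.sorted_rev_eq_foldl_insertBy, List.foldl_append]
      simp
    rw [hsnoc,
      filter_insertBy_max key m x (PySem.List.sorted xs key true)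
        (fun y hy => h y (List.mem_append_left _ ((PySem.List.mem_sorted xs key true y).mp hy)))
        (PySem.List.sorted_pairwise_rev xs key)
        (h x (by simp)),
      ih (fun y hy => h y (List.mem_append_left _ hy)), List.filter_append]
    by_cases hxm : key x = m <;> simp [hxm]

-- ---- characterisation of A's collection phase ----

lemma aCollect_eq_filter (List_ : List (String × Int)) (reverse : Bool)
    (hne : List_ ≠ []) (hnd : (List_.map Prod.fst).Nodup) :
    ∃ s ∈ List_.map Prod.fst,
      (∀ w ∈ List_.map Prod.fst, if reverse then dval List_ w ≤ dval List_ s else dval List_ s ≤ dval List_ w) ∧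
      aCollect List_ reverse
        = (List_.map Prod.fst).filter (fun w => dval List_ w == dval List_ s) := by
  have hkeys0 : (aDict List_).keys = List_.map Prod.fst := rfl
  have hknd : (aDict List_).keys.Nodup := by rw [hkeys0]; exact hnd
  have hsknd : (aSortedkeys List_ reverse).Nodup := by
    unfold aSortedkeys
    exact ((PySem.List.sorted_perm _ _ _).nodup_iff).mpr hknd
  have hitems : (aSortedList List_ reverse).items
      = (aSortedkeys List_ reverse).map (fun w => (w, (aDict List_).getD w 0)) := by
    unfold aSortedList
    have := PySem.Dict.items_foldl_insert_fresh (aSortedkeys List_ reverse) (fun w => w)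
      (fun w => (aDict List_).getD w 0) PySem.Dict.empty (fun a _ => by simp) (by simpa using hsknd)
    simpa using this
  have hkeysSL : (aSortedList List_ reverse).keys = aSortedkeys List_ reverse := by
    simp only [PySem.Dict.keys, hitems, List.map_map]
    simp [Function.comp_def]
  obtain ⟨s, t, hst⟩ : ∃ s t, aSortedkeys List_ reverse = s :: t := by
    cases hsk' : aSortedkeys List_ reverse with
    | nil =>
      exfalso
      have h0 : (aDict List_).keys = [] := by
        unfold aSortedkeys at hsk'
        exact (PySem.List.sorted_eq_nil_iff _ _ _).mp hsk'
      rw [hkeys0] at h0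
      exact hne (List.map_eq_nil_iff.mp h0)
    | cons s t => exact ⟨s, t, rfl⟩
  have hs_sk : s ∈ aSortedkeys List_ reverse := by rw [hst]; exact List.mem_cons_self
  have hs_keys : s ∈ (aDict List_).keys := by
    unfold aSortedkeys at hs_sk
    exact (PySem.List.mem_sorted _ _ _ _).mp hs_sk
  have hget : ∀ w ∈ aSortedkeys List_ reverse,
      (aSortedList List_ reverse).getD w 0 = (aDict List_).getD w 0 := by
    intro w hw
    exact PySem.Dict.getD_of_mem_items (aSortedList List_ reverse)
      (by rw [hitems]; exact List.mem_map_of_mem hw) (by rw [hkeysSL]; exact hsknd) 0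
  have hext : ∀ w ∈ (aDict List_).keys,
      if reverse then (aDict List_).getD w 0 ≤ (aDict List_).getD s 0
      else (aDict List_).getD s 0 ≤ (aDict List_).getD w 0 := by
    intro w hw
    unfold aSortedkeys at hst
    cases reverse with
    | false => simpa using PySem.List.key_head_sorted_le (aDict List_).keys _ hst w hw
    | true => simpa using PySem.List.key_head_sorted_rev_ge (aDict List_).keys _ hst w hw
  refine ⟨s, by rw [← hkeys0]; exact hs_keys, fun w hw => hext w (by rw [hkeys0]; exact hw), ?_⟩
  have hA : aCollect List_ reverse
      = (aSortedkeys List_ reverse).filter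
          (fun w => (aDict List_).getD w 0 == (aDict List_).getD s 0) := by
    unfold aCollect
    rw [hkeysSL, hst, PySem.List.pyGet?_zero_cons]
    rw [← hst]
    dsimp only
    rw [PySem.List.foldl_congr_mem (aSortedkeys List_ reverse)
        (fun acc key =>
          if (aSortedList List_ reverse).getD key 0 == (aSortedList List_ reverse).getD s 0
          then acc ++ [key] else acc)
        (fun acc key => if (aDict List_).getD key 0 == (aDict List_).getD s 0 then acc ++ [key] else acc) []
        (fun acc x hx => by simp only [hget x hx, hget s hs_sk])]
    rw [PySem.List.foldl_append_if_eq_filter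
        (fun w => (aDict List_).getD w 0 == (aDict List_).getD s 0) (aSortedkeys List_ reverse) []]
    simp
  rw [hA]
  have hfin : (aSortedkeys List_ reverse).filter
        (fun w => (aDict List_).getD w 0 == (aDict List_).getD s 0)
      = (aDict List_).keys.filter (fun w => (aDict List_).getD w 0 == (aDict List_).getD s 0) := by
    unfold aSortedkeys
    cases reverse with
    | false =>
      exact filter_sorted_min _ ((aDict List_).getD s 0) (aDict List_).keys
        (fun y hy => by simpa using hext y hy)
    | true =>
      exact filter_sorted_max _ ((aDict List_).getD s 0) (aDict List_).keys
        (fun y hy => by simpa using hext y hy)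
  rw [hfin, hkeys0]
  rfl

-- ---- characterisation of B's loop ----

lemma bLoop_min (rest : List (String × Int)) :
    ∀ (best : Int) (res : List String) (done : List (String × Int)),
    (∀ kv ∈ done, best ≤ kv.2) →
    res = (done.filter (fun kv => kv.2 == best)).map Prod.fst →
    rest.foldl (bStep false) (some best, res)
      = (some (rest.foldl (fun b kv => min b kv.2) best),
         ((done ++ rest).filter (fun kv => kv.2 == rest.foldl (fun b kv => min b kv.2) best)).map Prod.fst) := by
  induction rest with
  | nil =>
    intro best res done hle hres
    simp [hres]
  | cons kv rest ih =>
    intro best res done hle hres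
    simp only [List.foldl_cons]
    rcases lt_trichotomy kv.2 best with hlt | heq | hgt
    · have hstep : bStep false (some best, res) kv = (some kv.2, [kv.1]) := by
        simp [bStep, hlt]
      have h1 : ∀ kv' ∈ done ++ [kv], kv.2 ≤ kv'.2 := by
        intro kv' h'
        rcases List.mem_append.mp h' with h' | h'
        · have := hle kv' h'; omega
        · simp at h'; subst h'; omega
      have h2 : [kv.1] = ((done ++ [kv]).filter (fun kv' => kv'.2 == kv.2)).map Prod.fst := by
        have hdone : done.filter (fun kv' => kv'.2 == kv.2) = [] := by
          refine List.filter_eq_nil_iff.mpr ?_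
          intro z hz
          have := hle z hz
          simp; omega
        simp [List.filter_append, hdone]
      rw [hstep, show min best kv.2 = kv.2 from by omega, ih kv.2 [kv.1] (done ++ [kv]) h1 h2,
        List.append_cons]
      simp
    · subst heq
      have hstep : bStep false (some kv.2, res) kv = (some kv.2, res ++ [kv.1]) := by
        simp [bStep]
      have h2 : res ++ [kv.1] = ((done ++ [kv]).filter (fun kv' => kv'.2 == kv.2)).map Prod.fst := by
        simp [List.filter_append, hres]
      rw [hstep, show min kv.2 kv.2 = kv.2 from by omega,
        ih kv.2 (res ++ [kv.1]) (done ++ [kv]) (by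
          intro kv' h'
          rcases List.mem_append.mp h' with h' | h'
          · exact hle kv' h'
          · simp at h'; subst h'; omega) h2,
        List.append_cons]
      simp
    · have hnlt : ¬ kv.2 < best := by omega
      have hne' : (kv.2 == best) = false := by simp; omega
      have hstep : bStep false (some best, res) kv = (some best, res) := by
        simp [bStep, hnlt, hne']
      have h2 : res = ((done ++ [kv]).filter (fun kv' => kv'.2 == best)).map Prod.fst := by
        simp [List.filter_append, hres, hne']
      rw [hstep, show min best kv.2 = best from by omega,
        ih best res (done ++ [kv]) (by
          intro kv' h'
          rcases List.mem_append.mp h' with h' | h'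
          · exact hle kv' h'
          · simp at h'; subst h'; omega) h2,
        List.append_cons]
      simp

lemma bLoop_max (rest : List (String × Int)) :
    ∀ (best : Int) (res : List String) (done : List (String × Int)),
    (∀ kv ∈ done, kv.2 ≤ best) →
    res = (done.filter (fun kv => kv.2 == best)).map Prod.fst →
    rest.foldl (bStep true) (some best, res)
      = (some (rest.foldl (fun b kv => max b kv.2) best),
         ((done ++ rest).filter (fun kv => kv.2 == rest.foldl (fun b kv => max b kv.2) best)).map Prod.fst) := by
  induction rest with
  | nil =>
    intro best res done hle hres
    simp [hres]
  | cons kv rest ih =>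
    intro best res done hle hres
    simp only [List.foldl_cons]
    rcases lt_trichotomy best kv.2 with hlt | heq | hgt
    · have hstep : bStep true (some best, res) kv = (some kv.2, [kv.1]) := by
        simp [bStep, hlt]
      have h1 : ∀ kv' ∈ done ++ [kv], kv'.2 ≤ kv.2 := by
        intro kv' h'
        rcases List.mem_append.mp h' with h' | h'
        · have := hle kv' h'; omega
        · simp at h'; subst h'; omega
      have h2 : [kv.1] = ((done ++ [kv]).filter (fun kv' => kv'.2 == kv.2)).map Prod.fst := by
        have hdone : done.filter (fun kv' => kv'.2 == kv.2) = [] := by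
          refine List.filter_eq_nil_iff.mpr ?_
          intro z hz
          have := hle z hz
          simp; omega
        simp [List.filter_append, hdone]
      rw [hstep, show max best kv.2 = kv.2 from by omega, ih kv.2 [kv.1] (done ++ [kv]) h1 h2,
        List.append_cons]
      simp
    · have heq' : kv.2 = best := heq.symm
      subst heq'
      have hstep : bStep true (some kv.2, res) kv = (some kv.2, res ++ [kv.1]) := by
        simp [bStep]
      have h2 : res ++ [kv.1] = ((done ++ [kv]).filter (fun kv' => kv'.2 == kv.2)).map Prod.fst := by
        simp [List.filter_append, hres]
      rw [hstep, show max kv.2 kv.2 = kv.2 from by omega,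
        ih kv.2 (res ++ [kv.1]) (done ++ [kv]) (by
          intro kv' h'
          rcases List.mem_append.mp h' with h' | h'
          · exact hle kv' h'
          · simp at h'; subst h'; omega) h2,
        List.append_cons]
      simp
    · have hnlt : ¬ best < kv.2 := by omega
      have hne' : (kv.2 == best) = false := by simp; omega
      have hstep : bStep true (some best, res) kv = (some best, res) := by
        simp [bStep, hnlt, hne']
      have h2 : res = ((done ++ [kv]).filter (fun kv' => kv'.2 == best)).map Prod.fst := by
        simp [List.filter_append, hres, hne']
      rw [hstep, show max best kv.2 = best from by omega,
        ih best res (done ++ [kv]) (by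
          intro kv' h'
          rcases List.mem_append.mp h' with h' | h'
          · exact hle kv' h'
          · simp at h'; subst h'; omega) h2,
        List.append_cons]
      simp

lemma core (List_ : List (String × Int)) (reverse : Bool)
    (hne : List_ ≠ []) (hnd : (List_.map Prod.fst).Nodup) :
    aCollect List_ reverse = (List_.foldl (bStep reverse) (none, [])).2 := by
  obtain ⟨kv0, rest, rfl⟩ : ∃ kv0 rest, List_ = kv0 :: rest := by
    cases List_ with
    | nil => exact absurd rfl hne
    | cons kv0 rest => exact ⟨kv0, rest, rfl⟩
  obtain ⟨s, hs, hext, heq⟩ := aCollect_eq_filter (kv0 :: rest) reverse hne hnd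
  have hfirst : (kv0 :: rest).foldl (bStep reverse) (none, [])
      = rest.foldl (bStep reverse) (some kv0.2, [kv0.1]) := by
    simp [bStep]
  rw [heq, hfirst]
  cases reverse with
  | false =>
    have hB := bLoop_min rest kv0.2 [kv0.1] [kv0]
      (by intro kv h; simp at h; subst h; omega) (by simp)
    rw [hB]
    set M := rest.foldl (fun b kv => min b kv.2) kv0.2 with hM
    have hMfold : M = (rest.map Prod.snd).foldl min kv0.2 := by rw [List.foldl_map]
    have hMle : ∀ kv ∈ kv0 :: rest, M ≤ kv.2 := by
      intro kv hkv
      rcases List.mem_cons.mp hkv with h | h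
      · subst h; rw [hMfold]; exact (PySem.List.foldl_min_le _ _).1
      · rw [hMfold]; exact (PySem.List.foldl_min_le _ _).2 _ (List.mem_map_of_mem h)
    have hMmem : ∃ kv ∈ kv0 :: rest, M = kv.2 := by
      rcases PySem.List.foldl_min_mem (rest.map Prod.snd) kv0.2 with h | h
      · exact ⟨kv0, List.mem_cons_self, by rw [hMfold, h]⟩
      · obtain ⟨kv, hkv, hv⟩ := List.mem_map.mp h
        exact ⟨kv, List.mem_cons_of_mem _ hkv, by rw [hMfold, ← hv]⟩
    have hsM : dval (kv0 :: rest) s = M := by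
      obtain ⟨kvM, hkvM, hMv⟩ := hMmem
      obtain ⟨kvs, hkvs, hkvs1⟩ := List.mem_map.mp hs
      have h1 : dval (kv0 :: rest) s ≤ M := by
        have := hext kvM.1 (List.mem_map_of_mem hkvM)
        simp only [Bool.false_eq_true, if_false] at this
        rw [dval_eq _ hnd hkvM] at this
        omega
      have h2 : M ≤ dval (kv0 :: rest) s := by
        have hv : dval (kv0 :: rest) s = kvs.2 := by rw [← hkvs1]; exact dval_eq _ hnd hkvs
        rw [hv]
        exact hMle kvs hkvs
      omega
    simp only [List.singleton_append]
    rw [List.filter_map]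
    refine congrArg (List.map Prod.fst) ?_
    refine List.filter_congr ?_
    intro kv hkv
    simp only [Function.comp]
    rw [dval_eq _ hnd hkv, hsM]
  | true =>
    have hB := bLoop_max rest kv0.2 [kv0.1] [kv0]
      (by intro kv h; simp at h; subst h; omega) (by simp)
    rw [hB]
    set M := rest.foldl (fun b kv => max b kv.2) kv0.2 with hM
    have hMfold : M = (rest.map Prod.snd).foldl max kv0.2 := by rw [List.foldl_map]
    have hMle : ∀ kv ∈ kv0 :: rest, kv.2 ≤ M := by
      intro kv hkv
      rcases List.mem_cons.mp hkv with h | h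
      · subst h; rw [hMfold]; exact (PySem.List.le_foldl_max _ _).1
      · rw [hMfold]; exact (PySem.List.le_foldl_max _ _).2 _ (List.mem_map_of_mem h)
    have hMmem : ∃ kv ∈ kv0 :: rest, M = kv.2 := by
      rcases PySem.List.foldl_max_mem (rest.map Prod.snd) kv0.2 with h | h
      · exact ⟨kv0, List.mem_cons_self, by rw [hMfold, h]⟩
      · obtain ⟨kv, hkv, hv⟩ := List.mem_map.mp h
        exact ⟨kv, List.mem_cons_of_mem _ hkv, by rw [hMfold, ← hv]⟩
    have hsM : dval (kv0 :: rest) s = M := by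
      obtain ⟨kvM, hkvM, hMv⟩ := hMmem
      obtain ⟨kvs, hkvs, hkvs1⟩ := List.mem_map.mp hs
      have h1 : M ≤ dval (kv0 :: rest) s := by
        have := hext kvM.1 (List.mem_map_of_mem hkvM)
        simp only [if_true] at this
        rw [dval_eq _ hnd hkvM] at this
        omega
      have h2 : dval (kv0 :: rest) s ≤ M := by
        have hv : dval (kv0 :: rest) s = kvs.2 := by rw [← hkvs1]; exact dval_eq _ hnd hkvs
        rw [hv]
        exact hMle kvs hkvs
      omega
    simp only [List.singleton_append]
    rw [List.filter_map]
    refine congrArg (List.map Prod.fst) ?_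
    refine List.filter_congr ?_
    intro kv hkv
    simp only [Function.comp]
    rw [dval_eq _ hnd hkv, hsM]

-- ===== VERDICT (by name: the statement is the Claim_ definition above) =====
theorem sortid_list___py_spec : Claim_equal_sortid_list___py := by
  intro List_ reverse k _ hpre
  unfold Spec_sortid_list___py sortid_list___py sortid_list___py_alt
  rw [core List_ reverse hpre.1 hpre.2]
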